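-- pv_equiv track=rewrite | github.com/canelhasmateus/leet | out/production/leet/practice-001/002.py | solution
-- ===== SOURCE A (Python) =====
-- def solution( numbers ):
--
-- 	counts = {}
-- 	for digits in map( str , numbers):
-- 		for character in digits:
-- 			counts[character] = counts.get( character , 0 ) + 1
--
-- 	mx = max( counts.values() )
-- 	res = [ int( k)  for k , v in counts.items() if v == mx ]
-- 	return [ i for i in sorted( res ) ]
-- ===== SOURCE B (Python) =====
-- def solution(numbers):
--     chars = sorted(c for n in numbers for c in str(n))
--     groups = _runs(chars)
--     mx = max(length for _, length in groups)
--     return sorted(int(c) for c, length in groups if length == mx)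
--
--
-- def _runs(chars):
--     # run-length encode: one (char, run length) pair per maximal run
--     if not chars:
--         return []
--     c = chars[0]
--     rest = chars[1:]
--     i = 0
--     while i < len(rest) and rest[i] == c:
--         i += 1
--     return [(c, 1 + i)] + _runs(rest[i:])
-- ===== Notes on version B (the rewrite author's own statement) =====
-- stated objective: alternative
-- what changed: Replaces A's dict-counting pass over all characters by flatten, sort, run-length grouping: the groups of maximal run length are the most frequent digits.
-- outside the precondition, e.g. on solution([]): A raises ValueError, B raises ValueError; on solution([-1]): A raises ValueError, B raises ValueError
import Mathlib
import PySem

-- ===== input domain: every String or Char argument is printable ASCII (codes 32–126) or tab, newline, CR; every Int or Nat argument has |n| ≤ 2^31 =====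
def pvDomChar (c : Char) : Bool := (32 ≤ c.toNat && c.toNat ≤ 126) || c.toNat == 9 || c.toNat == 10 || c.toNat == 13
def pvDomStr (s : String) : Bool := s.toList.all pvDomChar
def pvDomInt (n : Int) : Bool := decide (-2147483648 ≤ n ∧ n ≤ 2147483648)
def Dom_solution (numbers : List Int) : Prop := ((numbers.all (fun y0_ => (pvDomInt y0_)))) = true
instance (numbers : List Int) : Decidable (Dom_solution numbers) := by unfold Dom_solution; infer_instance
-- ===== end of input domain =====

-- B replaces A's dict-counting pass by flatten → sort → run-length groups → keep groups of maximal
-- run length ("alternative": a sort-and-group algorithm, same exact result, no speed claim).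

-- ===== PORT A =====
def solution (numbers : List Int) : List Int :=
  let counts : PySem.Dict Char Int :=
    numbers.foldl
      (fun d n => (PySem.Int.toStr n).toList.foldl
        (fun d ch => d.insert ch (d.getD ch 0 + 1)) d)
      PySem.Dict.empty
  -- max(counts.values()) raises ValueError on an empty dict: Pre_ excludes numbers = []
  let mx : Int := (PySem.List.max? counts.values (fun v => v)).getD 0
  -- int(k) raises ValueError for k = '-': Pre_ excludes inputs where '-' reaches the maximal count
  let res : List Int :=
    (counts.items.filter (fun kv => kv.2 == mx)).map
      (fun kv => (PySem.Int.ofChars? [kv.1]).getD 0)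
  PySem.List.sorted res (fun i => i) false

-- ===== PORT B =====
-- _runs: run-length encoding; the inner while loop scans the prefix equal to the head
def runsB : List Char → List (Char × Int)
  | [] => []
  | c :: rest =>
    let pre := rest.takeWhile (fun x => x == c)
    (c, 1 + (pre.length : Int)) :: runsB (rest.drop pre.length)
termination_by l => l.length
decreasing_by
  simp only [List.length_drop, List.length_cons]
  omega

def solution_alt (numbers : List Int) : List Int :=
  let chars := PySem.List.sorted
    (numbers.flatMap (fun n => (PySem.Int.toStr n).toList)) (fun c => c) false
  let groups := runsB chars
  -- max(...) raises ValueError on empty: Pre_ excludes numbers = []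
  let mx : Int := (PySem.List.max? (groups.map (fun g => g.2)) (fun v => v)).getD 0
  -- int(c) raises ValueError for c = '-': Pre_ excludes inputs where '-' reaches the maximal count
  PySem.List.sorted
    ((groups.filter (fun g => g.2 == mx)).map (fun g => (PySem.Int.ofChars? [g.1]).getD 0))
    (fun i => i) false

-- ===== PRECONDITION & SPEC =====
-- Pre_ is exactly the inputs where the Python A returns: numbers nonempty (else max([]) raises
-- ValueError) and some digit character strictly more frequent than '-' (else int('-') raises ValueError).
def Pre_solution (numbers : List Int) : Prop :=
  numbers ≠ [] ∧
  ((numbers.flatMap (fun n => (PySem.Int.toStr n).toList)).any (fun c =>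
    (numbers.flatMap (fun n => (PySem.Int.toStr n).toList)).count '-' <
      (numbers.flatMap (fun n => (PySem.Int.toStr n).toList)).count c)) = true
instance (numbers : List Int) : Decidable (Pre_solution numbers) := by
  unfold Pre_solution; infer_instance

def pvWitness_solution : List Int := ([12, 7])

def Spec_solution (numbers : List Int) (out : List Int) : Prop := out = solution_alt numbers
instance (numbers : List Int) (out : List Int) : Decidable (Spec_solution numbers out) := by unfold Spec_solution; infer_instance

-- ===== CLAIM (what is proved, stated in full; the proofs are below) =====
def Claim_equal_solution : Prop := ∀ (numbers : List Int), Dom_solution numbers → Pre_solution numbers → Spec_solution numbers (solution numbers)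

-- ===== LEMMAS AND PROOFS =====

-- A's nested char loop over the number strings is the counting loop over the flattened char list.
theorem foldl_foldl_eq_foldl_flatMap {α β σ : Type} (f : σ → β → σ) (g : α → List β)
    (l : List α) (s : σ) :
    l.foldl (fun d a => (g a).foldl f d) s = (l.flatMap g).foldl f s := by
  induction l generalizing s with
  | nil => rfl
  | cons a t ih => simp [List.flatMap_cons, List.foldl_append, ih]

theorem dropWhile_eq_drop_length_takeWhile {α : Type} (p : α → Bool) (l : List α) :
    l.dropWhile p = l.drop (l.takeWhile p).length := by
  induction l with
  | nil => rfl
  | cons a t ih => by_cases h : p a <;> simp [h, ih]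

-- in a sorted list whose elements are all ≥ c, the c's form the prefix
theorem count_takeWhile_of_sorted (c : Char) (l : List Char)
    (hs : l.Pairwise (· ≤ ·)) (hc : ∀ x ∈ l, c ≤ x) :
    l.count c = (l.takeWhile (fun x => x == c)).length ∧ c ∉ l.dropWhile (fun x => x == c) := by
  induction l with
  | nil => simp
  | cons a t ih =>
    by_cases h : a = c
    · subst h
      rcases ih (List.Pairwise.of_cons hs) (fun x hx => hc x (List.mem_cons_of_mem _ hx)) with ⟨h1, h2⟩
      simp [List.takeWhile_cons, List.count_cons, h1, h2]
    · have hca : c < a := lt_of_le_of_ne (hc a (List.mem_cons_self)) (fun e => h e.symm)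
      have hnot : c ∉ a :: t := by
        intro hm
        rcases List.mem_cons.mp hm with e | hm
        · exact h e.symm
        · exact absurd ((List.pairwise_cons.mp hs).1 c hm) (not_le.mpr hca)
      constructor
      · have : (a == c) = false := by simp [h]
        simp [List.takeWhile_cons, this, List.count_eq_zero.mpr hnot]
      · have : (a == c) = false := by simp [h]
        simpa [List.dropWhile_cons, this] using hnot

-- runsB on a sorted list: the run keys are the distinct elements, each run length is its count
theorem runsB_sorted (l : List Char) (hs : l.Pairwise (· ≤ ·)) :
    ((runsB l).map (fun g => g.1)).Nodup ∧
    (∀ c, c ∈ (runsB l).map (fun g => g.1) ↔ c ∈ l) ∧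
    (∀ g ∈ runsB l, g.2 = (l.count g.1 : Int)) := by
  induction l using runsB.induct with
  | case1 => simp [runsB]
  | case2 c rest pre ih =>
    have hrest : rest.Pairwise (· ≤ ·) := List.Pairwise.of_cons hs
    have hge : ∀ x ∈ rest, c ≤ x := (List.pairwise_cons.mp hs).1
    obtain ⟨hcount, hnot⟩ := count_takeWhile_of_sorted c rest hrest hge
    have hdw : rest.dropWhile (fun x => x == c) = rest.drop pre.length := by
      simpa [pre] using dropWhile_eq_drop_length_takeWhile (fun x => x == c) rest
    have hsplit : pre ++ rest.drop pre.length = rest := by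
      simpa [pre, ← hdw] using List.takeWhile_append_dropWhile (p := fun x => x == c) (l := rest)
    have hpre : ∀ x ∈ pre, x = c := fun x hx => by
      simpa using List.mem_takeWhile_imp (l := rest) hx
    have hsuf : (rest.drop pre.length).Pairwise (· ≤ ·) :=
      hrest.sublist (List.drop_sublist _ _)
    obtain ⟨ihnd, ihmem, ihcnt⟩ := ih hsuf
    have hrB : runsB (c :: rest) = (c, 1 + (pre.length : Int)) :: runsB (rest.drop pre.length) := by
      rw [runsB]
    have hcnot : c ∉ rest.drop pre.length := by rwa [hdw] at hnot
    refine ⟨?_, ?_, ?_⟩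
    · rw [hrB]
      simp only [List.map_cons, List.nodup_cons]
      exact ⟨fun h => hcnot ((ihmem c).mp h), ihnd⟩
    · intro x
      rw [hrB]
      simp only [List.map_cons, List.mem_cons, ihmem]
      constructor
      · rintro (rfl | h)
        · exact .inl rfl
        · exact .inr (List.mem_of_mem_drop h)
      · rintro (rfl | h)
        · exact .inl rfl
        · rw [← hsplit] at h
          rcases List.mem_append.mp h with h | h
          · exact .inl (hpre x h)
          · exact .inr h
    · intro g hg
      rw [hrB] at hg
      simp only [List.mem_cons] at hg
      rcases hg with rfl | hg
      · have : (c :: rest).count c = 1 + pre.length := by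
          simp [List.count_cons, hcount, pre, Nat.add_comm]
        simp [this]
      · have hx : g.1 ∈ rest.drop pre.length := (ihmem g.1).mp (List.mem_map_of_mem hg)
        have hxc : g.1 ≠ c := fun e => hcnot (e ▸ hx)
        have hxpre : g.1 ∉ pre := fun h => hxc (hpre _ h)
        have : (c :: rest).count g.1 = (rest.drop pre.length).count g.1 := by
          rw [← hsplit, List.count_cons, List.count_append]
          simp [List.count_eq_zero.mpr hxpre, hxc, Ne.symm hxc]
        rw [ihcnt g hg, this]

-- max(xs) (as (max?).getD 0 over the identity key) depends only on the multiset of xs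
theorem maxD_perm (xs ys : List Int) (h : xs.Perm ys) :
    (PySem.List.max? xs (fun v => v)).getD 0 = (PySem.List.max? ys (fun v => v)).getD 0 := by
  cases hx : PySem.List.max? xs (fun v => v) with
  | none =>
    have hxs : xs = [] := (PySem.List.max?_eq_none_iff xs _).mp hx
    subst hxs
    have hys : ys = [] := h.symm.eq_nil
    subst hys
    rfl
  | some a =>
    cases hy : PySem.List.max? ys (fun v => v) with
    | none =>
      have hys : ys = [] := (PySem.List.max?_eq_none_iff ys _).mp hy
      subst hys
      have hxs : xs = [] := h.eq_nil
      subst hxs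
      rw [(PySem.List.max?_eq_none_iff [] (fun v => v)).mpr rfl] at hx
      cases hx
    | some b =>
      have hab : a ≤ b := PySem.List.max?_isMax hy a (h.mem_iff.mp (PySem.List.max?_mem hx))
      have hba : b ≤ a := PySem.List.max?_isMax hx b (h.mem_iff.mpr (PySem.List.max?_mem hy))
      simp [le_antisymm hab hba]

theorem solution_eq_alt (numbers : List Int) : solution numbers = solution_alt numbers := by
  set cs := numbers.flatMap (fun n => (PySem.Int.toStr n).toList) with hcs
  set chars := PySem.List.sorted cs (fun c => c) false with hchars
  have hsorted : chars.Pairwise (· ≤ ·) := PySem.List.sorted_pairwise cs (fun c => c)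
  have hpc : chars.Perm cs := PySem.List.sorted_perm cs (fun c => c) false
  obtain ⟨hnd, hmem, hcnt⟩ := runsB_sorted chars hsorted
  set S := PySem.Set.ofList cs with hS
  set keys := (runsB chars).map (fun g => g.1) with hkeys
  -- counts = counter cs
  have hcounter :
      numbers.foldl (fun d n => (PySem.Int.toStr n).toList.foldl
        (fun d ch => d.insert ch (d.getD ch 0 + 1)) d) PySem.Dict.empty
      = PySem.Dict.counter cs := by
    rw [foldl_foldl_eq_foldl_flatMap, ← hcs, PySem.Dict.foldl_insert_getD_add_one_eq_counter]
  -- keys ~ S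
  have hkS : keys.Perm S := by
    refine (List.perm_ext_iff_of_nodup hnd (PySem.Set.nodup_ofList cs)).mpr ?_
    intro a
    rw [PySem.Set.mem_ofList, ← hpc.mem_iff]
    exact hmem a
  -- groups.map snd = keys.map count
  have hsnd : (runsB chars).map (fun g => g.2) = keys.map (fun c => (cs.count c : Int)) := by
    rw [hkeys, List.map_map]
    refine List.map_congr_left ?_
    intro g hg
    simp only [Function.comp]
    rw [hcnt g hg, hpc.count_eq]
  -- equal maxima
  have hmx : (PySem.List.max? ((runsB chars).map (fun g => g.2)) (fun v => v)).getD 0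
      = (PySem.List.max? ((PySem.Dict.counter cs).values) (fun v => v)).getD 0 := by
    have hv : (PySem.Dict.counter cs).values = S.map (fun c => (cs.count c : Int)) := by
      simp only [PySem.Dict.values, PySem.Dict.items_counter, List.map_map]
      rfl
    rw [hsnd, hv]
    exact maxD_perm _ _ (hkS.map _)
  set mx := (PySem.List.max? ((PySem.Dict.counter cs).values) (fun v => v)).getD 0 with hmxdef
  -- canonical form of A
  have hA : solution numbers =
      PySem.List.sorted ((S.filter (fun c => (cs.count c : Int) == mx)).map
        (fun c => (PySem.Int.ofChars? [c]).getD 0)) (fun i => i) false := by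
    simp only [solution, hcounter, ← hmxdef]
    rw [PySem.Dict.items_counter, List.filter_map, List.map_map]
    rfl
  -- canonical form of B
  have hB : solution_alt numbers =
      PySem.List.sorted ((keys.filter (fun c => (cs.count c : Int) == mx)).map
        (fun c => (PySem.Int.ofChars? [c]).getD 0)) (fun i => i) false := by
    simp only [solution_alt, ← hcs, ← hchars, hmx, ← hmxdef]
    congr 1
    have hfc : (runsB chars).filter (fun g => g.2 == mx)
        = (runsB chars).filter ((fun c => (cs.count c : Int) == mx) ∘ (fun g => g.1)) := by
      refine List.filter_congr ?_
      intro g hg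
      simp only [Function.comp]
      rw [hcnt g hg, hpc.count_eq]
    rw [hfc, hkeys, List.filter_map, List.map_map]
    rfl
  rw [hA, hB]
  exact (PySem.List.sorted_id_eq_sorted_id_iff_perm _ _).mpr (((hkS.symm.filter _).map _))

-- ===== VERDICT (by name: the statement is the Claim_ definition above) =====
theorem solution_spec : Claim_equal_solution := by
  intro numbers _ _
  unfold Spec_solution
  exact solution_eq_alt numbers
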